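-- pv_equiv track=rewrite | github.com/theburhanahmed/NumerAI | backend/numerology/services/universal_cycles.py | _identify_essence_trends
-- ===== SOURCE A (Python) =====
-- from typing import Dict, Any, List
--
-- def _identify_essence_trends(cycles: List[Dict[str, Any]]) -> List[str]:
--     """Identify trends across essence cycles."""
--     trends = []
--
--     # Check for pattern of high opportunity cycles
--     opportunity_count = sum(1 for c in cycles if c['cycle_number'] in [1, 4, 8])
--     if opportunity_count >= 2:
--         trends.append('Multiple high-opportunity cycles ahead')
--
--     # Check for challenging cycles
--     challenging_count = sum(1 for c in cycles if c['cycle_number'] in [5, 7])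
--     if challenging_count >= 2:
--         trends.append('Some challenging cycles require preparation')
--
--     return trends
-- ===== SOURCE B (Python) =====
-- def _identify_essence_trends(cycles):
--     """Single short-circuit pass: two running tallies, stop scanning as soon as both thresholds are met."""
--     opp = 0
--     chal = 0
--     for c in cycles:
--         if opp >= 2 and chal >= 2:
--             break
--         n = c['cycle_number']
--         if n in (1, 4, 8):
--             opp += 1
--         elif n in (5, 7):
--             chal += 1
--     trends = []
--     if opp >= 2:
--         trends.append('Multiple high-opportunity cycles ahead')
--     if chal >= 2:
--         trends.append('Some challenging cycles require preparation')
--     return trends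
-- ===== Notes on version B (the rewrite author's own statement) =====
-- stated objective: alternative
-- what changed: B replaces A's two full counting scans with one short-circuiting pass maintaining both tallies at once and breaking out early as soon as both >=2 thresholds are already met, so the tail of the list may never be read.
import Mathlib
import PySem

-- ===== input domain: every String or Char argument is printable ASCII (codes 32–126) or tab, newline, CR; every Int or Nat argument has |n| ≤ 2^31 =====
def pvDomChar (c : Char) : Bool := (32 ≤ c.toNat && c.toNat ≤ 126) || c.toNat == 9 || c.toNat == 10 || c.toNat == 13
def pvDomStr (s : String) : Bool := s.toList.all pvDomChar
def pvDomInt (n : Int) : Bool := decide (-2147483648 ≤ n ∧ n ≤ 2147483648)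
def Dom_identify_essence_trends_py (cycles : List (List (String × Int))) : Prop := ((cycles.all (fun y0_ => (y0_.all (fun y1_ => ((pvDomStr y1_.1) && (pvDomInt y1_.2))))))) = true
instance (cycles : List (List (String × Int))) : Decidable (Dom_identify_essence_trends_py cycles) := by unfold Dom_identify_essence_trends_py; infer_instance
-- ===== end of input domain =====

-- ===== PORT A =====
-- B replaces A's two full counting scans with one short-circuiting pass (two tallies, early break); return values proved equal.
-- Python's c['cycle_number'] raises KeyError on a missing key; Pre_ excludes that, so getD's default is never used.
def identify_essence_trends_py (cycles : List (List (String × Int))) : List String :=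
  let trends : List String := []
  let opportunity_count : Int :=
    cycles.foldl (fun acc c =>
      if PySem.Dict.getD (PySem.Dict.mk c) "cycle_number" 0 ∈ ([1, 4, 8] : List Int) then acc + 1 else acc) 0
  let trends := if opportunity_count ≥ 2 then trends ++ ["Multiple high-opportunity cycles ahead"] else trends
  let challenging_count : Int :=
    cycles.foldl (fun acc c =>
      if PySem.Dict.getD (PySem.Dict.mk c) "cycle_number" 0 ∈ ([5, 7] : List Int) then acc + 1 else acc) 0
  let trends := if challenging_count ≥ 2 then trends ++ ["Some challenging cycles require preparation"] else trends
  trends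

-- ===== PORT B =====
-- the for-loop of Source B: two accumulators, break as soon as both thresholds are met
def pvAltLoop : List (List (String × Int)) → Int → Int → Int × Int
  | [], opp, chal => (opp, chal)
  | c :: rest, opp, chal =>
    if opp ≥ 2 ∧ chal ≥ 2 then (opp, chal)
    else
      let n := PySem.Dict.getD (PySem.Dict.mk c) "cycle_number" 0
      if n ∈ ([1, 4, 8] : List Int) then pvAltLoop rest (opp + 1) chal
      else if n ∈ ([5, 7] : List Int) then pvAltLoop rest opp (chal + 1)
      else pvAltLoop rest opp chal

def identify_essence_trends_py_alt (cycles : List (List (String × Int))) : List String :=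
  let oc := pvAltLoop cycles 0 0
  let trends : List String := []
  let trends := if oc.1 ≥ 2 then trends ++ ["Multiple high-opportunity cycles ahead"] else trends
  let trends := if oc.2 ≥ 2 then trends ++ ["Some challenging cycles require preparation"] else trends
  trends

-- ===== PRECONDITION & SPEC =====
-- Pre_ excludes exactly the inputs where A raises KeyError: some cycle dict lacks the key "cycle_number".
def Pre_identify_essence_trends_py (cycles : List (List (String × Int))) : Prop :=
  ∀ c ∈ cycles, (PySem.Dict.get? (PySem.Dict.mk c) "cycle_number").isSome
instance (cycles : List (List (String × Int))) : Decidable (Pre_identify_essence_trends_py cycles) := by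
  unfold Pre_identify_essence_trends_py; infer_instance
def pvWitness_identify_essence_trends_py : (List (List (String × Int))) :=
  [[("cycle_number", 1)], [("cycle_number", 4)], [("cycle_number", 5)]]
def Spec_identify_essence_trends_py (cycles : List (List (String × Int))) (out : List String) : Prop := out = identify_essence_trends_py_alt cycles
instance (cycles : List (List (String × Int))) (out : List String) : Decidable (Spec_identify_essence_trends_py cycles out) := by unfold Spec_identify_essence_trends_py; infer_instance

-- ===== CLAIM (what is proved, stated in full; the proofs are below) =====
def Claim_equal_identify_essence_trends_py : Prop := ∀ (cycles : List (List (String × Int))), Dom_identify_essence_trends_py cycles → Pre_identify_essence_trends_py cycles → Spec_identify_essence_trends_py cycles (identify_essence_trends_py cycles)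

-- ===== LEMMAS AND PROOFS =====

-- A's 0/1-sums are countP's over the key predicate.
theorem pvFoldA_count (cycles : List (List (String × Int))) (S : List Int) :
    cycles.foldl (fun acc c =>
      if PySem.Dict.getD (PySem.Dict.mk c) "cycle_number" 0 ∈ S then acc + 1 else acc) (0 : Int)
    = (cycles.countP (fun c : List (String × Int) => PySem.Dict.getD (PySem.Dict.mk c) "cycle_number" 0 ∈ S) : Int) := by
  have h := PySem.List.foldl_count_if
    (fun c : List (String × Int) => decide (PySem.Dict.getD (PySem.Dict.mk c) "cycle_number" 0 ∈ S)) cycles 0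
  simpa using h

-- the short-circuit loop meets each threshold exactly when the full count would
theorem pvAltLoop_thresh (l : List (List (String × Int))) (o c : Int) (ho : 0 ≤ o) (hc : 0 ≤ c) :
    ((pvAltLoop l o c).1 ≥ 2 ↔
      o + (l.countP (fun x : List (String × Int) => PySem.Dict.getD (PySem.Dict.mk x) "cycle_number" 0 ∈ ([1, 4, 8] : List Int)) : Int) ≥ 2)
    ∧ ((pvAltLoop l o c).2 ≥ 2 ↔
      c + (l.countP (fun x : List (String × Int) => PySem.Dict.getD (PySem.Dict.mk x) "cycle_number" 0 ∈ ([5, 7] : List Int)) : Int) ≥ 2) := by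
  induction l generalizing o c with
  | nil => simp [pvAltLoop]
  | cons x rest ih =>
    by_cases hbrk : o ≥ 2 ∧ c ≥ 2
    · have h1 : (0 : Int) ≤ (rest.countP (fun x : List (String × Int) => PySem.Dict.getD (PySem.Dict.mk x) "cycle_number" 0 ∈ ([1, 4, 8] : List Int)) : Int) := by positivity
      have h2 : (0 : Int) ≤ (rest.countP (fun x : List (String × Int) => PySem.Dict.getD (PySem.Dict.mk x) "cycle_number" 0 ∈ ([5, 7] : List Int)) : Int) := by positivity
      simp only [pvAltLoop, if_pos hbrk, List.countP_cons]
      constructor <;> constructor <;> intro _ <;> [skip; omega; skip; omega] <;>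
        · split_ifs <;> push_cast <;> omega
    · set n := PySem.Dict.getD (PySem.Dict.mk x) "cycle_number" 0 with hn
      by_cases hP : n ∈ ([1, 4, 8] : List Int)
      · have hQ : n ∉ ([5, 7] : List Int) := by
          simp only [List.mem_cons, List.not_mem_nil] at hP ⊢
          rcases hP with h | h | h | h <;> simp [h]
        have := ih (o + 1) c (by omega) hc
        simp only [pvAltLoop, if_neg hbrk, ← hn, if_pos hP, List.countP_cons]
        constructor
        · rw [this.1]; simp [hP]; constructor <;> intro <;> push_cast at * <;> omega
        · rw [this.2]; simp [hQ]
      · by_cases hQ : n ∈ ([5, 7] : List Int)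
        · have := ih o (c + 1) ho (by omega)
          simp only [pvAltLoop, if_neg hbrk, ← hn, if_neg hP, if_pos hQ, List.countP_cons]
          constructor
          · rw [this.1]; simp [hP]
          · rw [this.2]; simp [hQ]; constructor <;> intro <;> push_cast at * <;> omega
        · have := ih o c ho hc
          simp only [pvAltLoop, if_neg hbrk, ← hn, if_neg hP, if_neg hQ, List.countP_cons]
          constructor
          · rw [this.1]; simp [hP]
          · rw [this.2]; simp [hQ]

-- ===== VERDICT (by name: the statement is the Claim_ definition above) =====
theorem identify_essence_trends_py_spec : Claim_equal_identify_essence_trends_py := by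
  intro cycles _ _
  unfold Spec_identify_essence_trends_py identify_essence_trends_py identify_essence_trends_py_alt
  obtain ⟨h1, h2⟩ := pvAltLoop_thresh cycles 0 0 le_rfl le_rfl
  simp only [pvFoldA_count, h1, h2, zero_add]
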